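-- pv_equiv track=rewrite | github.com/lorenzocastillo/Algos-and-DS | python_problems/BabyNames.py | baby_names2
-- ===== SOURCE A (Python) =====
-- from collections import defaultdict
--
-- def baby_names2(name_frequencies, synonyms):
--     """
--     Build a graph of synonyms. This will create connected subgraphs for all the synonyms of each game. We will then
--     traverse the graph, keeping track of the frequencies of the names. Once a subgraph is traversed, we will print the
--     total frequency for that subgraph.
--     :param name_frequencies:
--     :param synonyms:
--     :return:
--     """
--     edges = defaultdict(list)
--     for name1, name2 in synonyms:
--         edges[name1].append(name2)
--         edges[name2].append(name1)
--
--     visited = set()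
--
--     def dfs(start):
--         count = 0
--         for synonym in  edges[start]:
--             if synonym not in visited:
--                 visited.add(synonym)
--                 count += dfs(synonym) + name_frequencies[synonym]
--         return count
--
--     # Sorting to give consistent output in test function
--     result = list()
--     for name in sorted(name_frequencies.keys()):
--         if name not in visited:
--             visited.add(name)
--             count = name_frequencies[name]
--             count += dfs(name)
--             result.append((name, count))
--     return result
-- ===== SOURCE B (Python) =====
-- def baby_names2(name_frequencies, synonyms):
--     # Iterative version: same component sweep, but the recursive DFS is replaced
--     # by an explicit stack of pending neighbor lists (defunctionalized recursion).
--     adj = {}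
--     for a, b in synonyms:
--         adj.setdefault(a, []).append(b)
--         adj.setdefault(b, []).append(a)
--
--     visited = set()
--     result = []
--     for name in sorted(name_frequencies):
--         if name not in visited:
--             visited.add(name)
--             total = name_frequencies[name]
--             stack = [adj.get(name, [])]
--             while stack:
--                 rest = stack.pop()
--                 if not rest:
--                     continue
--                 syn = rest[0]
--                 stack.append(rest[1:])
--                 if syn not in visited:
--                     visited.add(syn)
--                     total += name_frequencies[syn]
--                     stack.append(adj.get(syn, []))
--             result.append((name, total))
--     return result
-- ===== Notes on version B (the rewrite author's own statement) =====
-- stated objective: alternative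
-- what changed: The recursive shared-visited DFS of A is replaced by an iterative component sweep driven by an explicit stack of pending neighbor lists (defunctionalized recursion), so B uses no recursion at all and cannot hit Python's recursion limit on deep components.
import Mathlib
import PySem

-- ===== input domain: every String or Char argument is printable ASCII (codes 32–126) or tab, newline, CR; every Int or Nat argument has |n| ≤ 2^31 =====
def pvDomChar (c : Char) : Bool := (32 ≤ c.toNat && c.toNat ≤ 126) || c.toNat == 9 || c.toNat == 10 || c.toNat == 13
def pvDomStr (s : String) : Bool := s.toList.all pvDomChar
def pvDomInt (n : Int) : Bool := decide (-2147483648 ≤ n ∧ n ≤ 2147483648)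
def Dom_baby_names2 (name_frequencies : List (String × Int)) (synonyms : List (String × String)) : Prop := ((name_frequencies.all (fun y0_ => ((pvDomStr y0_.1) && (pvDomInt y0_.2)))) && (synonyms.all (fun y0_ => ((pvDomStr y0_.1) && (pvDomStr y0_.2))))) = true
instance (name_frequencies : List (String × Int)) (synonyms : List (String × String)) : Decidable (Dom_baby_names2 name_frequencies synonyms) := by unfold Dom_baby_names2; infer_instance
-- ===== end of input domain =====

-- B replaces A's recursive DFS by an iterative sweep with an explicit stack of pending
-- neighbor lists (no recursion); same asymptotic cost, equivalence proved on Pre_.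


-- ===== PORT A =====
-- edges = defaultdict(list); for n1, n2 in synonyms: edges[n1].append(n2); edges[n2].append(n1)
def pvEdgesA (synonyms : List (String × String)) : PySem.Dict String (List String) :=
  synonyms.foldl (fun d p =>
    let d1 := d.insert p.1 (d.getD p.1 [] ++ [p.2])
    d1.insert p.2 (d1.getD p.2 [] ++ [p.1])) PySem.Dict.empty

mutual
-- A's recursive dfs; state threaded = (count, visited).  The Nat fuel only guards totality:
-- with the fuel passed by pvMainA it is never exhausted (recursion depth ≤ number of names).
-- 'name_frequencies[synonym]' is fr; its KeyError is excluded by Pre_baby_names2, on which getD _ 0 is exact.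
def pvDfsA (fr : String → Int) (E : String → List String) :
    Nat → String → PySem.Set String → Int × PySem.Set String
  | 0, _, vis => (0, vis)
  | f+1, start, vis => pvProcA fr E f (E start) (0, vis)
  termination_by f _ _ => (f, 0)
-- the 'for synonym in edges[start]' loop of dfs
def pvProcA (fr : String → Int) (E : String → List String) :
    Nat → List String → Int × PySem.Set String → Int × PySem.Set String
  | _, [], acc => acc
  | f, s :: l, acc =>
    if PySem.Set.contains acc.2 s then pvProcA fr E f l acc
    else
      let r := pvDfsA fr E f s (PySem.Set.add acc.2 s)
      pvProcA fr E f l (acc.1 + (r.1 + fr s), r.2)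
  termination_by f l _ => (f, l.length + 1)
end

-- 'for name in sorted(name_frequencies.keys()): …'
def pvMainA (fr : String → Int) (E : String → List String) (fuel : Nat) :
    List String → PySem.Set String → List (String × Int) → List (String × Int)
  | [], _, res => res
  | k :: ks, vis, res =>
    if PySem.Set.contains vis k then pvMainA fr E fuel ks vis res
    else
      let r := pvDfsA fr E fuel k (PySem.Set.add vis k)
      pvMainA fr E fuel ks r.2 (res ++ [(k, fr k + r.1)])

def baby_names2 (name_frequencies : List (String × Int)) (synonyms : List (String × String)) : List (String × Int) :=
  let freq := PySem.Dict.ofList name_frequencies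
  let edges := pvEdgesA synonyms
  pvMainA (fun s => freq.getD s 0) (fun s => edges.getD s [])
    (2 * synonyms.length + 2)
    (PySem.List.sorted freq.keys (fun s => s) false) PySem.Set.empty []

-- ===== PORT B =====
-- adj.setdefault(a, []).append(b) : adj[a] = adj.get(a, []) + [b]  (Dict.modify)
def pvAdjB (synonyms : List (String × String)) : PySem.Dict String (List String) :=
  synonyms.foldl (fun d p =>
    (d.modify p.1 [] (fun l => l ++ [p.2])).modify p.2 [] (fun l => l ++ [p.1]))
    PySem.Dict.empty

-- B's 'while stack:' loop; the stack holds pending neighbor lists, head = top.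
-- Fuel only guards totality (decremented exactly once per newly visited name, never exhausted).
def pvLoopB (fr : String → Int) (E : String → List String) :
    Nat → List (List String) → PySem.Set String → Int → Int × PySem.Set String
  | _, [], vis, t => (t, vis)
  | f, [] :: stack, vis, t => pvLoopB fr E f stack vis t
  | 0, (s :: rest) :: stack, vis, t =>
    if PySem.Set.contains vis s then pvLoopB fr E 0 (rest :: stack) vis t
    else (t, vis)   -- fuel guard, never reached
  | f+1, (s :: rest) :: stack, vis, t =>
    if PySem.Set.contains vis s then pvLoopB fr E (f+1) (rest :: stack) vis t
    else pvLoopB fr E f (E s :: rest :: stack) (PySem.Set.add vis s) (t + fr s)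
termination_by f stack _ _ => (f, (stack.map (fun l => l.length + 1)).sum)

-- 'for name in sorted(name_frequencies): …'
def pvMainB (fr : String → Int) (E : String → List String) (fuel : Nat) :
    List String → PySem.Set String → List (String × Int) → List (String × Int)
  | [], _, res => res
  | k :: ks, vis, res =>
    if PySem.Set.contains vis k then pvMainB fr E fuel ks vis res
    else
      let r := pvLoopB fr E fuel [E k] (PySem.Set.add vis k) (fr k)
      pvMainB fr E fuel ks r.2 (res ++ [(k, r.1)])

def baby_names2_alt (name_frequencies : List (String × Int)) (synonyms : List (String × String)) : List (String × Int) :=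
  let freq := PySem.Dict.ofList name_frequencies
  let adj := pvAdjB synonyms
  pvMainB (fun s => freq.getD s 0) (fun s => adj.getD s [])
    (2 * synonyms.length + 2)
    (PySem.List.sorted freq.keys (fun s => s) false) PySem.Set.empty []

-- ===== PRECONDITION & SPEC =====
-- Pre_ excludes exactly the inputs where the Python A raises KeyError: a synonym pair linking a
-- frequency key with a dangling name that has no frequency (such a name is always reached by the
-- traversal of its component and looked up in name_frequencies).  Both A and B raise there.
def Pre_baby_names2 (name_frequencies : List (String × Int)) (synonyms : List (String × String)) : Prop :=
  ∀ p ∈ synonyms, (p.1 ∈ name_frequencies.map Prod.fst ↔ p.2 ∈ name_frequencies.map Prod.fst)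
instance (name_frequencies : List (String × Int)) (synonyms : List (String × String)) : Decidable (Pre_baby_names2 name_frequencies synonyms) := by unfold Pre_baby_names2; infer_instance

def pvWitness_baby_names2 : (List (String × Int)) × (List (String × String)) :=
  ([("alice", 3), ("bob", 2), ("carl", 5)], [("alice", "bob")])

def Spec_baby_names2 (name_frequencies : List (String × Int)) (synonyms : List (String × String)) (out : List (String × Int)) : Prop := out = baby_names2_alt name_frequencies synonyms
instance (name_frequencies : List (String × Int)) (synonyms : List (String × String)) (out : List (String × Int)) : Decidable (Spec_baby_names2 name_frequencies synonyms out) := by unfold Spec_baby_names2; infer_instance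

-- ===== CLAIM (what is proved, stated in full; the proofs are below) =====
def Claim_equal_baby_names2 : Prop := ∀ (name_frequencies : List (String × Int)) (synonyms : List (String × String)), Dom_baby_names2 name_frequencies synonyms → Pre_baby_names2 name_frequencies synonyms → Spec_baby_names2 name_frequencies synonyms (baby_names2 name_frequencies synonyms)

-- ===== LEMMAS AND PROOFS =====

-- all names mentioned in synonyms (first occurrences); every neighbor list is contained in it
def pvNames (synonyms : List (String × String)) : List String :=
  PySem.List.dedup (synonyms.flatMap (fun p => [p.1, p.2]))

-- number of names not yet visited
def pvNV (names vis : List String) : Nat :=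
  (names.filter (fun n => !PySem.Set.contains vis n)).length

lemma pvNV_le (names vis : List String) : pvNV names vis ≤ names.length :=
  List.length_filter_le _ _

lemma pvNV_anti (names vis vis' : List String) (h : ∀ x ∈ vis, x ∈ vis') :
    pvNV names vis' ≤ pvNV names vis := by
  unfold pvNV
  apply List.Sublist.length_le
  apply List.monotone_filter_right
  intro a ha
  simp only [PySem.Set.contains_eq_listContains, Bool.not_eq_true', ← Bool.not_eq_true,
    List.contains_iff_mem] at *
  intro hm
  exact ha (h a hm)

lemma pvNV_add (names vis : List String) (s : String) (hNo : names.Nodup)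
    (hs : s ∈ names) (hv : s ∉ vis) :
    pvNV names (vis ++ [s]) + 1 = pvNV names vis := by
  unfold pvNV
  induction names with
  | nil => simp at hs
  | cons a ns ih =>
    simp only [List.nodup_cons] at hNo
    by_cases hsa : a = s
    · subst hsa
      rw [List.filter_cons_of_neg (by simp [PySem.Set.contains]),
          List.filter_cons_of_pos (by simp [PySem.Set.contains, hv])]
      have : ∀ n ∈ ns, (fun n => !PySem.Set.contains (vis ++ [a]) n) n
            = (fun n => !PySem.Set.contains vis n) n := by
        intro n hn
        have : n ≠ a := fun e => hNo.1 (e ▸ hn)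
        simp [PySem.Set.contains, this]
      rw [List.filter_congr this]
      simp
    · have hs' : s ∈ ns := by rcases List.mem_cons.mp hs with h | h; exact absurd h.symm hsa; exact h
      have ih' := ih hNo.2 hs'
      by_cases hav : a ∈ vis
      · rw [List.filter_cons_of_neg (by simp [PySem.Set.contains, hav]),
            List.filter_cons_of_neg (by simp [PySem.Set.contains, hav])]
        exact ih'
      · have has : a ≠ s := fun e => hNo.1 (e ▸ hs')
        rw [List.filter_cons_of_pos (by simp [PySem.Set.contains, hav, has]),
            List.filter_cons_of_pos (by simp [PySem.Set.contains, hav])]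
        simp only [List.length_cons]
        omega

lemma pvProcA_shift (fr : String → Int) (E : String → List String) :
    ∀ (l : List String) (f : Nat) (c : Int) (vis : PySem.Set String),
    pvProcA fr E f l (c, vis) =
      (c + (pvProcA fr E f l (0, vis)).1, (pvProcA fr E f l (0, vis)).2) := by
  intro l
  induction l with
  | nil => intro f c vis; simp [pvProcA]
  | cons s l ih =>
    intro f c vis
    simp only [pvProcA]
    by_cases h : PySem.Set.contains vis s
    · simp only [h, if_true]; exact ih f c vis
    · simp only [h, if_false, Bool.false_eq_true]
      rw [ih f (c + _), ih f (0 + _)]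
      simp only [Prod.mk.injEq]
      exact ⟨by ring, trivial⟩

lemma pvProcA_vis (fr : String → Int) (E : String → List String) (names : List String)
    (hE : ∀ a, ∀ b ∈ E a, b ∈ names) :
    ∀ (f : Nat) (l : List String) (c : Int) (vis : PySem.Set String), (∀ x ∈ l, x ∈ names) →
    (∀ x ∈ vis, x ∈ (pvProcA fr E f l (c, vis)).2) ∧
    (∀ x ∈ (pvProcA fr E f l (c, vis)).2, x ∈ vis ∨ x ∈ names) := by
  intro f
  induction f with
  | zero =>
    intro l
    induction l with
    | nil =>
      intro c vis _
      simp only [pvProcA]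
      exact ⟨fun x hx => hx, fun x hx => Or.inl hx⟩
    | cons s l ihl =>
      intro c vis hl
      simp only [pvProcA]
      by_cases h : PySem.Set.contains vis s
      · simp only [h, if_true]
        exact ihl c vis (fun x hx => hl x (List.mem_cons_of_mem _ hx))
      · simp only [h, if_false, Bool.false_eq_true, pvDfsA]
        have hadd : ∀ x ∈ PySem.Set.add vis s, x ∈ vis ∨ x ∈ names := by
          intro x hx
          rcases (PySem.Set.mem_add _ _ _).mp hx with hx | rfl
          · exact Or.inl hx
          · exact Or.inr (hl _ (by simp))
        have := ihl (c + ((0:Int) + fr s)) (PySem.Set.add vis s) (fun x hx => hl x (List.mem_cons_of_mem _ hx))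
        refine ⟨fun x hx => this.1 x ((PySem.Set.mem_add _ _ _).mpr (Or.inl hx)), fun x hx => ?_⟩
        rcases this.2 x hx with hx' | hx'
        · exact hadd x hx'
        · exact Or.inr hx'
  | succ f ihf =>
    intro l
    induction l with
    | nil =>
      intro c vis _
      simp only [pvProcA]
      exact ⟨fun x hx => hx, fun x hx => Or.inl hx⟩
    | cons s l ihl =>
      intro c vis hl
      simp only [pvProcA]
      by_cases h : PySem.Set.contains vis s
      · simp only [h, if_true]
        exact ihl c vis (fun x hx => hl x (List.mem_cons_of_mem _ hx))
      · simp only [h, if_false, Bool.false_eq_true, pvDfsA]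
        have hsn : s ∈ names := hl _ (by simp)
        have hdfs := ihf (E s) 0 (PySem.Set.add vis s) (hE s)
        set r := pvProcA fr E f (E s) (0, PySem.Set.add vis s) with hr
        have hadd : ∀ x ∈ PySem.Set.add vis s, x ∈ vis ∨ x ∈ names := by
          intro x hx
          rcases (PySem.Set.mem_add _ _ _).mp hx with hx | rfl
          · exact Or.inl hx
          · exact Or.inr hsn
        have h1 : ∀ x ∈ vis, x ∈ r.2 := fun x hx => hdfs.1 x ((PySem.Set.mem_add _ _ _).mpr (Or.inl hx))
        have h2 : ∀ x ∈ r.2, x ∈ vis ∨ x ∈ names := by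
          intro x hx
          rcases hdfs.2 x hx with hx' | hx'
          · exact hadd x hx'
          · exact Or.inr hx'
        have := ihl (c + (r.1 + fr s)) r.2 (fun x hx => hl x (List.mem_cons_of_mem _ hx))
        refine ⟨fun x hx => this.1 x (h1 x hx), fun x hx => ?_⟩
        rcases this.2 x hx with hx' | hx'
        · exact h2 x hx'
        · exact Or.inr hx'

lemma pvSim (fr : String → Int) (E : String → List String) (names : List String)
    (hNo : names.Nodup) (hE : ∀ a, ∀ b ∈ E a, b ∈ names) :
    ∀ (n : Nat) (l : List String) (stack : List (List String)) (vis : PySem.Set String)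
      (t : Int) (fA fB : Nat), (∀ x ∈ l, x ∈ names) →
      pvNV names vis ≤ n → n < fA → n < fB →
      pvLoopB fr E fB (l :: stack) vis t =
        pvLoopB fr E (fB - (pvNV names vis - pvNV names (pvProcA fr E fA l (0, vis)).2)) stack
          (pvProcA fr E fA l (0, vis)).2 (t + (pvProcA fr E fA l (0, vis)).1) := by
  intro n
  induction n using Nat.strong_induction_on with
  | _ n IH =>
  intro l
  induction l with
  | nil =>
    intro stack vis t fA fB hl hnv hfa hfb
    simp [pvProcA, pvLoopB]
  | cons s l ihl =>
    intro stack vis t fA fB hl hnv hfa hfb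
    obtain ⟨fA', rfl⟩ : ∃ fA', fA = fA' + 1 := ⟨fA - 1, by omega⟩
    obtain ⟨fB', rfl⟩ : ∃ fB', fB = fB' + 1 := ⟨fB - 1, by omega⟩
    by_cases h : PySem.Set.contains vis s
    · have hmem : s ∈ vis := (PySem.Set.contains_iff _ _).mp h
      rw [show pvLoopB fr E (fB'+1) ((s :: l) :: stack) vis t
           = pvLoopB fr E (fB'+1) (l :: stack) vis t by
            simp [pvLoopB]
            intro hc; exact absurd hmem hc]
      rw [show pvProcA fr E (fA'+1) (s :: l) (0, vis) = pvProcA fr E (fA'+1) l (0, vis) by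
            simp [pvProcA]
            intro hc; exact absurd hmem hc]
      exact ihl stack vis t (fA'+1) (fB'+1) (fun x hx => hl x (List.mem_cons_of_mem _ hx)) hnv hfa hfb
    · have hsn : s ∈ names := hl _ (by simp)
      have hsv : s ∉ vis := fun hm => h ((PySem.Set.contains_iff _ _).mpr hm)
      have hadd : PySem.Set.add vis s = vis ++ [s] := PySem.Set.add_of_not_mem hsv
      have hnv1 : 1 ≤ pvNV names vis := by
        have : s ∈ names.filter (fun n => !PySem.Set.contains vis n) :=
          List.mem_filter.mpr ⟨hsn, by simp [PySem.Set.contains, hsv]⟩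
        have := List.length_pos_of_mem this
        unfold pvNV; omega
      have hv0 : pvNV names (vis ++ [s]) + 1 = pvNV names vis := pvNV_add names vis s hNo hsn hsv
      -- A side head step
      have hA : pvProcA fr E (fA'+1) (s :: l) (0, vis) =
          pvProcA fr E (fA'+1) l
            (0 + ((pvProcA fr E fA' (E s) (0, vis ++ [s])).1 + fr s),
             (pvProcA fr E fA' (E s) (0, vis ++ [s])).2) := by
        simp [pvProcA, pvDfsA, hadd]
        intro hc; exact absurd hc hsv
      set r := pvProcA fr E fA' (E s) (0, vis ++ [s]) with hr
      set q := pvProcA fr E (fA'+1) l (0, r.2) with hq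
      have hsub1 := pvProcA_vis fr E names hE fA' (E s) 0 (vis ++ [s]) (hE s)
      have hm1 : pvNV names r.2 ≤ pvNV names (vis ++ [s]) := pvNV_anti names _ _ hsub1.1
      have hsub2 := pvProcA_vis fr E names hE (fA'+1) l 0 r.2 (fun x hx => hl x (List.mem_cons_of_mem _ hx))
      have hm2 : pvNV names q.2 ≤ pvNV names r.2 := pvNV_anti names _ _ hsub2.1
      -- B side head step
      have hB : pvLoopB fr E (fB'+1) ((s :: l) :: stack) vis t =
          pvLoopB fr E fB' (E s :: l :: stack) (vis ++ [s]) (t + fr s) := by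
        simp [pvLoopB, hadd]
        intro hc; exact absurd hc hsv
      rw [hB]
      have hIH1 := IH (n-1) (by omega) (E s) (l :: stack) (vis ++ [s]) (t + fr s) fA' fB'
        (hE s) (by omega) (by omega) (by omega)
      rw [← hr] at hIH1
      rw [hIH1]
      have hIH2 := IH (pvNV names r.2) (by omega) l stack r.2 (t + fr s + r.1) (fA'+1)
        (fB' - (pvNV names (vis ++ [s]) - pvNV names r.2))
        (fun x hx => hl x (List.mem_cons_of_mem _ hx)) (le_refl _) (by omega) (by omega)
      rw [← hq] at hIH2
      rw [hIH2]
      rw [hA, pvProcA_shift fr E l (fA'+1) (0 + (r.1 + fr s)) r.2, ← hq]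
      have hfuel : fB' - (pvNV names (vis ++ [s]) - pvNV names r.2) - (pvNV names r.2 - pvNV names q.2)
          = fB' + 1 - (pvNV names vis - pvNV names q.2) := by omega
      have htot : t + fr s + r.1 + q.1 = t + (0 + (r.1 + fr s) + q.1) := by ring
      rw [hfuel, htot]

lemma pvMains (fr : String → Int) (E : String → List String) (names : List String) (fuel : Nat)
    (hNo : names.Nodup) (hE : ∀ a, ∀ b ∈ E a, b ∈ names)
    (hfuel : names.length + 1 < fuel) :
    ∀ (ks : List String) (vis : PySem.Set String) (res : List (String × Int)),
      pvMainA fr E fuel ks vis res = pvMainB fr E fuel ks vis res := by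
  intro ks
  induction ks with
  | nil => intro vis res; rfl
  | cons k ks ih =>
    intro vis res
    obtain ⟨F', rfl⟩ : ∃ F', fuel = F' + 1 := ⟨fuel - 1, by omega⟩
    by_cases h : PySem.Set.contains vis k
    · rw [show pvMainA fr E (F'+1) (k :: ks) vis res = pvMainA fr E (F'+1) ks vis res by
            simp [pvMainA]
            intro hc; exact absurd ((PySem.Set.contains_iff _ _).mp h) hc,
          show pvMainB fr E (F'+1) (k :: ks) vis res = pvMainB fr E (F'+1) ks vis res by
            simp [pvMainB]
            intro hc; exact absurd ((PySem.Set.contains_iff _ _).mp h) hc]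
      exact ih vis res
    · have hkv : k ∉ vis := fun hm => h ((PySem.Set.contains_iff _ _).mpr hm)
      have hsim := pvSim fr E names hNo hE (pvNV names (PySem.Set.add vis k)) (E k) []
        (PySem.Set.add vis k) (fr k) F' (F'+1) (hE k) (le_refl _)
        (by have := pvNV_le names (PySem.Set.add vis k); omega)
        (by have := pvNV_le names (PySem.Set.add vis k); omega)
      rw [show pvMainA fr E (F'+1) (k :: ks) vis res
            = pvMainA fr E (F'+1) ks (pvProcA fr E F' (E k) (0, PySem.Set.add vis k)).2
                (res ++ [(k, fr k + (pvProcA fr E F' (E k) (0, PySem.Set.add vis k)).1)]) by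
            simp [pvMainA, pvDfsA]
            intro hc; exact absurd hc hkv,
          show pvMainB fr E (F'+1) (k :: ks) vis res
            = pvMainB fr E (F'+1) ks (pvLoopB fr E (F'+1) [E k] (PySem.Set.add vis k) (fr k)).2
                (res ++ [(k, (pvLoopB fr E (F'+1) [E k] (PySem.Set.add vis k) (fr k)).1)]) by
            simp [pvMainB]
            intro hc; exact absurd hc hkv]
      rw [hsim]
      simp only [pvLoopB]
      exact ih _ _

lemma pvEdges_sub_aux (names : List String) :
    ∀ (l : List (String × String)) (d : PySem.Dict String (List String)),
    (∀ p ∈ l, p.1 ∈ names ∧ p.2 ∈ names) →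
    (∀ a, ∀ b ∈ d.getD a [], b ∈ names) →
    ∀ a, ∀ b ∈ (l.foldl (fun d p =>
        let d1 := d.insert p.1 (d.getD p.1 [] ++ [p.2])
        d1.insert p.2 (d1.getD p.2 [] ++ [p.1])) d).getD a [], b ∈ names := by
  intro l
  induction l with
  | nil => intro d _ hd a b hb; exact hd a b hb
  | cons p l ih =>
    intro d hl hd a b hb
    refine ih _ (fun q hq => hl q (List.mem_cons_of_mem _ hq)) ?_ a b hb
    have hp := hl p (by simp)
    intro a' b' hb'
    simp only [PySem.Dict.getD_insert] at hb'
    split_ifs at hb' with h1 h2 h3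
    · rcases List.mem_append.mp hb' with hb'' | hb''
      · rcases List.mem_append.mp hb'' with hb3 | hb3
        · exact hd _ _ hb3
        · rw [List.mem_singleton.mp hb3]; exact hp.2
      · rw [List.mem_singleton.mp hb'']; exact hp.1
    · rcases List.mem_append.mp hb' with hb'' | hb''
      · exact hd _ _ hb''
      · rw [List.mem_singleton.mp hb'']; exact hp.1
    · rcases List.mem_append.mp hb' with hb'' | hb''
      · exact hd _ _ hb''
      · rw [List.mem_singleton.mp hb'']; exact hp.2
    · exact hd _ _ hb'

lemma pvEdges_sub (synonyms : List (String × String)) :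
    ∀ a, ∀ b ∈ (pvEdgesA synonyms).getD a [], b ∈ pvNames synonyms := by
  refine pvEdges_sub_aux (pvNames synonyms) synonyms PySem.Dict.empty ?_ ?_
  · intro p hp
    constructor <;>
      · unfold pvNames
        rw [PySem.List.dedup_eq_ofList, PySem.Set.mem_ofList]
        exact List.mem_flatMap.mpr ⟨p, hp, by simp⟩
  · intro a b hb
    simp [PySem.Dict.getD, PySem.Dict.get?, PySem.Dict.empty] at hb

lemma pvAdjB_eq (synonyms : List (String × String)) : pvAdjB synonyms = pvEdgesA synonyms := rfl

lemma pvNames_len (synonyms : List (String × String)) :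
    (pvNames synonyms).length ≤ 2 * synonyms.length := by
  unfold pvNames
  rw [PySem.List.dedup_eq_ofList]
  have h1 := PySem.Set.length_ofList_le (synonyms.flatMap (fun p => [p.1, p.2]))
  have h2 : (synonyms.flatMap (fun p => [p.1, p.2])).length = 2 * synonyms.length := by
    induction synonyms with
    | nil => simp
    | cons q qs ihq => simp [List.flatMap_cons]; omega
  omega

-- ===== VERDICT (by name: the statement is the Claim_ definition above) =====
theorem baby_names2_spec : Claim_equal_baby_names2 := by
  intro nf syn _ _
  unfold Spec_baby_names2 baby_names2 baby_names2_alt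
  rw [pvAdjB_eq]
  exact pvMains _ _ (pvNames syn) _ (PySem.List.nodup_dedup _) (pvEdges_sub syn)
    (by have := pvNames_len syn; omega) _ _ _
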